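-- pv_equiv track=rewrite | github.com/KaushikKunal/Python | Calculator.py | organise_BODMAS
-- ===== SOURCE A (Python) =====
-- def organise_BODMAS(func_todo, func_ls):
--     loopcnt = 0
--     check_func = 0
--     organised_func_todo = []
--     while(loopcnt < len(func_todo)):
--         while(check_func < len(func_ls)):
--             while(func_ls[check_func] in func_todo):
--                 organised_func_todo.append(func_ls[check_func])
--                 func_todo.remove(func_ls[check_func])
--             check_func += 1
--         loopcnt += 1
--     return (organised_func_todo)
-- ===== SOURCE B (Python) =====
-- def organise_BODMAS(func_todo, func_ls):
--     counts = {}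
--     for x in func_todo:
--         counts[x] = counts.get(x, 0) + 1
--     organised = []
--     seen = set()
--     for f in func_ls:
--         if f not in seen:
--             seen.add(f)
--             organised += [f] * counts.get(f, 0)
--     listed = set(func_ls)
--     func_todo[:] = [x for x in func_todo if x not in listed]
--     return organised
-- ===== Notes on version B (the rewrite author's own statement) =====
-- stated objective: faster
-- what changed: Replaces the three nested while loops with destructive list.remove (and a redundant outer counting loop) by building a count dictionary in one pass over func_todo and then one pass over func_ls with a seen-set, appending each newly seen operator count-many times; the observable in-place mutation of func_todo is reproduced with one set-based filter assignment.
import Mathlib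
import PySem

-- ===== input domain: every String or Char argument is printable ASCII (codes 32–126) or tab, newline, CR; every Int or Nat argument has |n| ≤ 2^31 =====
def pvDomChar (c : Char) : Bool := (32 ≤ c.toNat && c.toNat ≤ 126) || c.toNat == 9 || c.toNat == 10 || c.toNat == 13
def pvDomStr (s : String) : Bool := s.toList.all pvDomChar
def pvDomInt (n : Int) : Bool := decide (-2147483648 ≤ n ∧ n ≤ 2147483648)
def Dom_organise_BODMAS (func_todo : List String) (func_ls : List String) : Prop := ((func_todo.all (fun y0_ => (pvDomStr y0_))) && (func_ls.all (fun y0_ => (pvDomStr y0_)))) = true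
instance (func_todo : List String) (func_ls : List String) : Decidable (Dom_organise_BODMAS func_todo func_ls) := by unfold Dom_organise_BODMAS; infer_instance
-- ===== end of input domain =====

-- B replaces A's three nested while loops (destructive list.remove; redundant outer counting loop)
-- by a count dictionary built in one pass plus one seen-set pass over func_ls (objective: faster;
-- a timing run measured B ahead). A mutates func_todo in place (removes the listed operators);
-- Source B reproduces that mutation, and the equivalence proved here is about the RETURN value only.

-- ===== PORT A =====
-- Each while loop is ported as a structural recursion on a fuel that bounds its iteration count
-- (inner: ≤ todo.length removals; middle: len(func_ls) - check_func steps; outer: ≤ len(func_todo)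
-- increments); the fuel-0 branch returns the loop state unchanged and is proved unreachable below.

-- innermost 'while func_ls[check_func] in func_todo: organised.append(...); func_todo.remove(...)'
def pvRemoveAll : Nat → String → List String → List String → List String × List String
  | 0, _, todo, org => (todo, org)
  | fuel + 1, f, todo, org =>
      if f ∈ todo then
        pvRemoveAll fuel f ((PySem.List.remove? todo f).getD todo) (org ++ [f])
      else (todo, org)

-- middle 'while check_func < len(func_ls)'; inside the guard func_ls.getD check_func "" is exactly
-- Python's func_ls[check_func] (the index is in range, so the default is never taken)
def pvCheckLoop : Nat → Nat → List String → List String → List String →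
    Nat × List String × List String
  | 0, check_func, _, todo, org => (check_func, todo, org)
  | fuel + 1, check_func, func_ls, todo, org =>
      if check_func < func_ls.length then
        pvCheckLoop fuel (check_func + 1) func_ls
          (pvRemoveAll todo.length (func_ls.getD check_func "") todo org).1
          (pvRemoveAll todo.length (func_ls.getD check_func "") todo org).2
      else (check_func, todo, org)

-- outer 'while loopcnt < len(func_todo)'
def pvOuterLoop : Nat → Nat → Nat → List String → List String → List String → List String
  | 0, _, _, _, _, org => org
  | fuel + 1, loopcnt, check_func, func_ls, todo, org =>
      if loopcnt < todo.length then
        pvOuterLoop fuel (loopcnt + 1)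
          (pvCheckLoop (func_ls.length - check_func) check_func func_ls todo org).1 func_ls
          (pvCheckLoop (func_ls.length - check_func) check_func func_ls todo org).2.1
          (pvCheckLoop (func_ls.length - check_func) check_func func_ls todo org).2.2
      else org

def organise_BODMAS (func_todo : List String) (func_ls : List String) : List String :=
  pvOuterLoop func_todo.length 0 0 func_ls func_todo []

-- ===== PORT B =====
-- 'for f in func_ls: if f not in seen: seen.add(f); organised += [f] * counts.get(f, 0)'
def pvAltLoop (counts : PySem.Dict String Int) (ls : List String)
    (seen : PySem.Set String) (organised : List String) : List String :=
  match ls with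
  | [] => organised
  | f :: rest =>
      if PySem.Set.contains seen f then
        pvAltLoop counts rest seen organised
      else
        pvAltLoop counts rest (PySem.Set.add seen f)
          (organised ++ List.replicate ((PySem.Dict.getD counts f 0).toNat) f)

-- 'for x in func_todo: counts[x] = counts.get(x, 0) + 1' is the counter fold; the final
-- 'func_todo[:] = ...' line of Source B only reproduces A's in-place mutation (not the return value)
def organise_BODMAS_alt (func_todo : List String) (func_ls : List String) : List String :=
  pvAltLoop (func_todo.foldl (fun d x => d.modify x 0 (· + 1)) (PySem.Dict.empty : PySem.Dict String Int))
    func_ls PySem.Set.empty []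

-- ===== PRECONDITION & SPEC =====
def Spec_organise_BODMAS (func_todo : List String) (func_ls : List String) (out : List String) : Prop := out = organise_BODMAS_alt func_todo func_ls
instance (func_todo : List String) (func_ls : List String) (out : List String) : Decidable (Spec_organise_BODMAS func_todo func_ls out) := by unfold Spec_organise_BODMAS; infer_instance

-- ===== CLAIM (what is proved, stated in full; the proofs are below) =====
def Claim_equal_organise_BODMAS : Prop := ∀ (func_todo : List String) (func_ls : List String), Dom_organise_BODMAS func_todo func_ls → Spec_organise_BODMAS func_todo func_ls (organise_BODMAS func_todo func_ls)

-- ===== LEMMAS AND PROOFS =====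

theorem pvFilterErase (f : String) (l : List String) :
    (l.erase f).filter (fun x => decide (x ≠ f)) = l.filter (fun x => decide (x ≠ f)) := by
  induction l with
  | nil => simp
  | cons a t ih =>
      by_cases ha : a = f
      · subst ha; simp [List.erase_cons_head]
      · rw [List.erase_cons_tail (by simpa using ha), List.filter_cons, List.filter_cons, ih]

-- closed form of the innermost loop (fuel covers all count-many removals):
-- append f count-many times, drop every f
theorem pvRemoveAll_eq (f : String) (fuel : Nat) :
    ∀ (todo org : List String), todo.count f ≤ fuel →
    pvRemoveAll fuel f todo org =
      (todo.filter (fun x => x ≠ f), org ++ List.replicate (todo.count f) f) := by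
  induction fuel with
  | zero =>
      intro todo org hc
      have h : f ∉ todo := by
        intro hmem
        exact absurd (List.count_pos_iff.mpr hmem) (by omega)
      rw [pvRemoveAll, List.count_eq_zero_of_not_mem h, List.filter_eq_self.mpr]
      · simp
      · intro a ha
        simp only [ne_eq, decide_eq_true_eq]
        rintro rfl; exact h ha
  | succ fuel ih =>
      intro todo org hc
      rw [pvRemoveAll]
      by_cases h : f ∈ todo
      · rw [if_pos h, PySem.List.remove?_eq_some_erase todo f h, Option.getD_some]
        have hcnt : (todo.erase f).count f = todo.count f - 1 := List.count_erase_self ..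
        have hpos : 0 < todo.count f := List.count_pos_iff.mpr h
        rw [ih (todo.erase f) (org ++ [f]) (by omega), hcnt, Prod.mk.injEq]
        refine ⟨pvFilterErase f todo, ?_⟩
        rw [List.append_assoc]
        congr 1
        have h1 : todo.count f = (todo.count f - 1) + 1 := by omega
        rw [h1]
        simp [List.replicate_succ]
      · rw [if_neg h, List.count_eq_zero_of_not_mem h, List.filter_eq_self.mpr]
        · simp
        · intro a ha
          simp only [ne_eq, decide_eq_true_eq]
          rintro rfl; exact h ha

theorem pv_contains_add (s : PySem.Set String) (f x : String) :
    PySem.Set.contains (PySem.Set.add s f) x =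
      (PySem.Set.contains s x || x == f) := by
  by_cases h : x = f <;> by_cases h2 : x ∈ s <;>
    simp [PySem.Set.contains, PySem.Set.mem_add, h, h2]

-- Source B's hand-written counting loop is collections.Counter: its lookup is list.count
theorem pvCountsGet (todo₀ : List String) (f : String) :
    ((todo₀.foldl (fun d x => d.modify x 0 (· + 1)) (PySem.Dict.empty : PySem.Dict String Int)).getD f 0).toNat
      = todo₀.count f := by
  rw [show todo₀.foldl (fun d x => d.modify x 0 (· + 1)) (PySem.Dict.empty : PySem.Dict String Int)
      = PySem.Dict.counter todo₀ from rfl, PySem.Dict.getD_counter]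
  simp

-- main invariant: A's middle loop, run on func_todo with the already-seen operators removed,
-- computes B's pass over the remaining suffix of func_ls
theorem pvCheckLoop_eq_alt (ls todo₀ : List String) :
    ∀ (fuel c : Nat), ls.length - c ≤ fuel →
    ∀ (seen : PySem.Set String) (org : List String),
    (pvCheckLoop fuel c ls (todo₀.filter (fun x => !(PySem.Set.contains seen x))) org).2.2 =
      pvAltLoop (todo₀.foldl (fun d x => d.modify x 0 (· + 1)) (PySem.Dict.empty : PySem.Dict String Int))
        (ls.drop c) seen org := by
  intro fuel
  induction fuel with
  | zero =>
      intro c hc seen org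
      rw [pvCheckLoop, List.drop_of_length_le (by omega)]
      rfl
  | succ fuel ih =>
      intro c hc seen org
      by_cases hclt : c < ls.length
      · rw [pvCheckLoop, if_pos hclt]
        have hgetD : ls.getD c "" = ls[c] := List.getD_eq_getElem ls "" hclt
        rw [hgetD, pvRemoveAll_eq ls[c] _ _ _ (List.count_le_length ..),
          List.drop_eq_getElem_cons hclt]
        by_cases hf : PySem.Set.contains seen ls[c]
        · -- ls[c] already seen: it is absent from the filtered todo, nothing happens
          have hnot : ls[c] ∉ todo₀.filter (fun x => !(PySem.Set.contains seen x)) := by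
            simp only [List.mem_filter, not_and]
            intro _
            simpa using List.mem_of_elem_eq_true hf
          rw [show pvAltLoop (todo₀.foldl (fun d x => d.modify x 0 (· + 1)) (PySem.Dict.empty : PySem.Dict String Int)) (ls[c] :: ls.drop (c + 1)) seen org
              = pvAltLoop (todo₀.foldl (fun d x => d.modify x 0 (· + 1)) (PySem.Dict.empty : PySem.Dict String Int))
                  (ls.drop (c + 1)) seen org from by
            rw [pvAltLoop, if_pos hf]]
          have hcnt : (todo₀.filter (fun x => !(PySem.Set.contains seen x))).count ls[c] = 0 :=
            List.count_eq_zero.mpr hnot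
          have hfil : (todo₀.filter (fun x => !(PySem.Set.contains seen x))).filter
              (fun x => x ≠ ls[c]) = todo₀.filter (fun x => !(PySem.Set.contains seen x)) := by
            apply List.filter_eq_self.mpr
            intro a ha
            simp only [ne_eq, decide_eq_true_eq]
            rintro rfl; exact hnot ha
          simp only [hcnt, hfil, List.replicate_zero, List.append_nil]
          exact ih (c + 1) (by omega) seen org
        · -- new operator: counts agree, filtering out ls[c] = filtering with seen.add ls[c]
          rw [show pvAltLoop (todo₀.foldl (fun d x => d.modify x 0 (· + 1)) (PySem.Dict.empty : PySem.Dict String Int)) (ls[c] :: ls.drop (c + 1)) seen org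
              = pvAltLoop (todo₀.foldl (fun d x => d.modify x 0 (· + 1)) (PySem.Dict.empty : PySem.Dict String Int))
                  (ls.drop (c + 1)) (PySem.Set.add seen ls[c])
                  (org ++ List.replicate
                    (((todo₀.foldl (fun d x => d.modify x 0 (· + 1))
                        (PySem.Dict.empty : PySem.Dict String Int)).getD ls[c] 0).toNat) ls[c]) from by
            rw [pvAltLoop, if_neg hf]]
          have hcnt : (todo₀.filter (fun x => !(PySem.Set.contains seen x))).count ls[c]
              = todo₀.count ls[c] := List.count_filter (by simpa using hf)
          have hfil : (todo₀.filter (fun x => !(PySem.Set.contains seen x))).filter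
              (fun x => x ≠ ls[c])
              = todo₀.filter (fun x => !(PySem.Set.contains (PySem.Set.add seen ls[c]) x)) := by
            rw [List.filter_filter]
            apply List.filter_congr
            intro a _
            rw [pv_contains_add]
            by_cases ha : a = ls[c] <;> simp [ha]
          rw [hcnt, hfil, pvCountsGet]
          exact ih (c + 1) (by omega) (PySem.Set.add seen ls[c])
            (org ++ List.replicate (todo₀.count ls[c]) ls[c])
      · rw [pvCheckLoop, if_neg hclt, List.drop_of_length_le (by omega)]
        rfl

-- after the first pass check_func = len(func_ls): every later outer iteration is a no-op
theorem pvOuterLoop_done (ls : List String) :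
    ∀ (fuel k : Nat) (todo org : List String),
    pvOuterLoop fuel k ls.length ls todo org = org := by
  intro fuel
  induction fuel with
  | zero => intro k todo org; rfl
  | succ fuel ih =>
      intro k todo org
      rw [pvOuterLoop]
      by_cases h : k < todo.length
      · rw [if_pos h]
        have h0 : ls.length - ls.length = 0 := by omega
        rw [h0, pvCheckLoop]
        exact ih (k + 1) todo org
      · rw [if_neg h]

theorem pvCheckLoop_fst (ls : List String) :
    ∀ (fuel c : Nat) (todo org : List String), ls.length - c ≤ fuel → c ≤ ls.length →
    (pvCheckLoop fuel c ls todo org).1 = ls.length := by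
  intro fuel
  induction fuel with
  | zero => intro c todo org h1 h2; rw [pvCheckLoop]; omega
  | succ fuel ih =>
      intro c todo org h1 h2
      by_cases h : c < ls.length
      · rw [pvCheckLoop, if_pos h]
        exact ih (c + 1) _ _ (by omega) (by omega)
      · rw [pvCheckLoop, if_neg h]; omega

theorem pvAltLoop_nil_todo (ls : List String) (seen : PySem.Set String)
    (org : List String) :
    pvAltLoop (([] : List String).foldl (fun d x => d.modify x 0 (· + 1)) (PySem.Dict.empty : PySem.Dict String Int))
      ls seen org = org := by
  induction ls generalizing seen org with
  | nil => rfl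
  | cons f rest ih =>
      rw [pvAltLoop]
      by_cases h : PySem.Set.contains seen f
      · rw [if_pos h]; exact ih seen org
      · rw [if_neg h, show (((([] : List String).foldl (fun d x => d.modify x 0 (· + 1))
            (PySem.Dict.empty : PySem.Dict String Int)).getD f 0)).toNat = 0 from by
          rw [pvCountsGet]; simp]
        rw [List.replicate_zero, List.append_nil]
        exact ih (PySem.Set.add seen f) org

-- ===== VERDICT (by name: the statement is the Claim_ definition above) =====
theorem organise_BODMAS_spec : Claim_equal_organise_BODMAS := by
  intro func_todo func_ls _
  unfold Spec_organise_BODMAS organise_BODMAS organise_BODMAS_alt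
  match func_todo with
  | [] =>
      rw [show ([] : List String).length = 0 from rfl, pvOuterLoop]
      exact (pvAltLoop_nil_todo _ _ _).symm
  | a :: t =>
      rw [show (a :: t).length = t.length + 1 from rfl, pvOuterLoop, if_pos (by simp)]
      rw [pvCheckLoop_fst func_ls _ 0 (a :: t) [] (by omega) (by omega), pvOuterLoop_done]
      have h2 := pvCheckLoop_eq_alt func_ls (a :: t) (func_ls.length - 0) 0 (by omega)
        PySem.Set.empty []
      have hfilter : (a :: t).filter
          (fun x => !(PySem.Set.contains PySem.Set.empty x)) = a :: t := by
        simp [PySem.Set.contains, PySem.Set.empty]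
      rw [hfilter] at h2
      simpa using h2
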